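-- pv_equiv track=rewrite | github.com/rahul0070/BJ-madhu | miscellaneous.py | sumWithAce
-- ===== SOURCE A (Python) =====
-- def isInList(Input):
-- 	li = ['J', 'K', 'Q']
-- 	if Input == 'J' or Input == 'K' or Input == 'Q':
-- 		return True
--
-- def sumWithAce(list, aceValue):
-- 	result = 0
-- 	for i in list:
-- 		if i == 'A':
-- 			i = int(aceValue)
-- 		if isInList(i) == True:
-- 			i = 10
-- 		result = result + int(i)
-- 	return result
-- ===== SOURCE B (Python) =====
-- def sumWithAce(list, aceValue):
--     aces = list.count('A')
--     faces = list.count('J') + list.count('K') + list.count('Q')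
--     rest = sum(int(x) for x in list if x not in ('A', 'J', 'K', 'Q'))
--     return int(aceValue) * aces + 10 * faces + rest
-- ===== Notes on version B (the rewrite author's own statement) =====
-- stated objective: alternative
-- what changed: Replaces the per-card accumulator with three branch tests inside one loop by category tallies: count the aces and face cards once, sum the numeric tokens separately, and combine the tallies arithmetically.
import Mathlib
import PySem

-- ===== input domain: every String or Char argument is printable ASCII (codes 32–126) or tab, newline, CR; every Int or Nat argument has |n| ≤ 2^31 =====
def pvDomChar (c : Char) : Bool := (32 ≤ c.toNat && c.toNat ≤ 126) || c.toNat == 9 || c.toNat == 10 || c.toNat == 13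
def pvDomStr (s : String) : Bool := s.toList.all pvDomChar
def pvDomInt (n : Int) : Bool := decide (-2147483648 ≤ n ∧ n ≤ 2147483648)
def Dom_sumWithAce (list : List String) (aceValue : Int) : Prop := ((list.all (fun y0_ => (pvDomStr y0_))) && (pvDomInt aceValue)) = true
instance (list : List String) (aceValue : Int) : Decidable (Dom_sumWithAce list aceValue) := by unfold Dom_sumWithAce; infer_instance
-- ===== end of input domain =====

-- B replaces A's per-card accumulator (branch chain inside one fold) by category tallies:
-- count aces and face cards, sum the remaining numeric tokens, combine arithmetically (objective: alternative).

-- ===== PORT A =====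
-- A's loop: result += aceValue if card is 'A' (int(aceValue) = aceValue; the isInList test on the
-- replaced int value never fires), 10 for 'J'/'K'/'Q' (isInList), else int(card).
-- int(card) is PySem.Int.ofStr?; the ValueError case (none) is excluded by Pre_, getD 0 is unreachable there.
def sumWithAce (list : List String) (aceValue : Int) : Int :=
  list.foldl
    (fun result i =>
      if i = "A" then result + aceValue
      else if i = "J" ∨ i = "K" ∨ i = "Q" then result + 10
      else result + (PySem.Int.ofStr? i).getD 0)
    0

-- ===== PORT B =====
def sumWithAce_alt (list : List String) (aceValue : Int) : Int :=
  let aces : Int := PySem.List.count list "A"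
  let faces : Int := PySem.List.count list "J" + PySem.List.count list "K" + PySem.List.count list "Q"
  let rest : Int :=
    ((list.filter (fun x => ¬(x = "A" ∨ x = "J" ∨ x = "K" ∨ x = "Q"))).map
      (fun x => (PySem.Int.ofStr? x).getD 0)).sum
  aceValue * aces + 10 * faces + rest

-- ===== PRECONDITION & SPEC =====
-- Pre_ excludes exactly the inputs on which Python A raises ValueError: a token that is
-- none of 'A','J','K','Q' and is not parseable by int().
def Pre_sumWithAce (list : List String) (aceValue : Int) : Prop :=
  ∀ x ∈ list, x = "A" ∨ x = "J" ∨ x = "K" ∨ x = "Q" ∨ (PySem.Int.ofStr? x).isSome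
instance (list : List String) (aceValue : Int) : Decidable (Pre_sumWithAce list aceValue) := by
  unfold Pre_sumWithAce; infer_instance
def pvWitness_sumWithAce : List String × Int := (["A", "J", "10", "-3"], 11)

def Spec_sumWithAce (list : List String) (aceValue : Int) (out : Int) : Prop := out = sumWithAce_alt list aceValue
instance (list : List String) (aceValue : Int) (out : Int) : Decidable (Spec_sumWithAce list aceValue out) := by unfold Spec_sumWithAce; infer_instance

-- ===== CLAIM (what is proved, stated in full; the proofs are below) =====
def Claim_equal_sumWithAce : Prop := ∀ (list : List String) (aceValue : Int), Dom_sumWithAce list aceValue → Pre_sumWithAce list aceValue → Spec_sumWithAce list aceValue (sumWithAce list aceValue)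

-- ===== LEMMAS AND PROOFS =====

-- A's fold from accumulator r is r plus B's combined tallies (induction on the card list).
theorem sumWithAce_foldl_eq (aceValue : Int) (l : List String) (r : Int) :
    l.foldl
      (fun result i =>
        if i = "A" then result + aceValue
        else if i = "J" ∨ i = "K" ∨ i = "Q" then result + 10
        else result + (PySem.Int.ofStr? i).getD 0)
      r = r + sumWithAce_alt l aceValue := by
  induction l generalizing r with
  | nil => simp [sumWithAce_alt]
  | cons x xs ih =>
    simp only [List.foldl_cons, ih]
    simp only [sumWithAce_alt, PySem.List.count_eq, List.count_cons, List.filter_cons]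
    by_cases hA : x = "A"
    · simp [hA]; ring
    · by_cases hJ : x = "J"
      · simp [hJ]; ring
      · by_cases hK : x = "K"
        · simp [hK]; ring
        · by_cases hQ : x = "Q"
          · simp [hQ]; ring
          · simp [hA, hJ, hK, hQ]; ring

-- ===== VERDICT (by name: the statement is the Claim_ definition above) =====
theorem sumWithAce_spec : Claim_equal_sumWithAce := by
  intro list aceValue _ _
  show sumWithAce list aceValue = sumWithAce_alt list aceValue
  unfold sumWithAce
  rw [sumWithAce_foldl_eq]
  ring
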